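-- pv_equiv track=rewrite | github.com/kevin-bruhwiler/StarCraftAI | GA/genome.py | build_requirements_met
-- ===== SOURCE A (Python) =====
-- def build_requirements_met(start, build_order, required_units):
--     for required_unit, required_amount in required_units.items():
--         amount = 0
--         if required_unit in start.keys():
--             amount += start[required_unit]
--         for unit in build_order:
--             if unit == required_unit:
--                 amount += 1
--         if amount < required_amount:
--             return False
--     return True
-- ===== SOURCE B (Python) =====
-- def build_requirements_met(start, build_order, required_units):
--     needed = {u: required_units[u] - start.get(u, 0) for u in required_units}
--     for unit in build_order:
--         if unit in needed:
--             needed[unit] -= 1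
--     return all(v <= 0 for v in needed.values())
-- ===== Notes on version B (the rewrite author's own statement) =====
-- stated objective: alternative
-- what changed: Inverts the loop nesting: instead of scanning build_order once per required unit, B builds a deficit table (required minus starting amount) and makes a single pass over build_order decrementing deficits, then checks all deficits are non-positive.
import Mathlib
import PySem

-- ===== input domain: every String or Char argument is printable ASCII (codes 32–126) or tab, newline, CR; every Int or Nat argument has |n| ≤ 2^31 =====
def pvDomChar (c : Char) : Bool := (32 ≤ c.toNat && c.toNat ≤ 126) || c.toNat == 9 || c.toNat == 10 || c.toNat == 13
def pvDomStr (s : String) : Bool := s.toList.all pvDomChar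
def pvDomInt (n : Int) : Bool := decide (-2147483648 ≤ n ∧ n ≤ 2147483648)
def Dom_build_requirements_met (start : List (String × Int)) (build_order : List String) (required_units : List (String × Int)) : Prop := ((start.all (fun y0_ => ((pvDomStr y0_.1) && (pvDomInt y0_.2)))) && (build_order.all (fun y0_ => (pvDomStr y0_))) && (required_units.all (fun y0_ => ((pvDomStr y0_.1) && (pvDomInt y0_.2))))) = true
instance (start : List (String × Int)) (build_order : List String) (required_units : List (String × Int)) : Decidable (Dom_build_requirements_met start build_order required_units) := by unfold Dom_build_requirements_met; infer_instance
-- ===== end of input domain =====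

-- B replaces A's per-required-unit scans of build_order by a deficit table and ONE pass over
-- build_order (alternative decomposition; return value only, neither side mutates its arguments).

-- ===== PORT A =====
-- outer loop 'for required_unit, required_amount in required_units.items(): … return False / return True'
def brmA_loop (start : List (String × Int)) (build_order : List String) : List (String × Int) → Bool
  | [] => true
  | (required_unit, required_amount) :: rest =>
    let amount : Int := 0
    -- 'if required_unit in start.keys(): amount += start[required_unit]' — getD under the contains guard is exact
    let amount := if (PySem.Dict.mk start).contains required_unit then amount + (PySem.Dict.mk start).getD required_unit 0 else amount
    -- 'for unit in build_order: if unit == required_unit: amount += 1'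
    let amount := build_order.foldl (fun a unit => if unit == required_unit then a + 1 else a) amount
    if amount < required_amount then false else brmA_loop start build_order rest

def build_requirements_met (start : List (String × Int)) (build_order : List String) (required_units : List (String × Int)) : Bool :=
  brmA_loop start build_order required_units

-- ===== PORT B =====
def build_requirements_met_alt (start : List (String × Int)) (build_order : List String) (required_units : List (String × Int)) : Bool :=
  -- needed = {u: required_units[u] - start.get(u, 0) for u in required_units}
  -- (required_units[u] cannot raise: u ranges over its keys, so getD is exact)
  let needed := required_units.foldl
    (fun d p => d.insert p.1 ((PySem.Dict.mk required_units).getD p.1 0 - (PySem.Dict.mk start).getD p.1 0))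
    PySem.Dict.empty
  -- for unit in build_order: if unit in needed: needed[unit] -= 1
  let needed := build_order.foldl
    (fun d unit => if d.contains unit then d.modify unit 0 (fun v => v - 1) else d) needed
  -- all(v <= 0 for v in needed.values())
  needed.values.all (fun v => decide (v ≤ 0))

-- ===== PRECONDITION & SPEC =====
-- Pre_ excludes association lists whose required_units keys repeat: a Python dict cannot hold
-- duplicate keys, so such lists have no canonical dict reading (A's port checks every duplicate
-- entry, B's deficit table keeps one per key — an artefact of the list encoding, a defensible corner).
def Pre_build_requirements_met (start : List (String × Int)) (build_order : List String) (required_units : List (String × Int)) : Prop :=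
  (required_units.map Prod.fst).Nodup
instance (start : List (String × Int)) (build_order : List String) (required_units : List (String × Int)) : Decidable (Pre_build_requirements_met start build_order required_units) := by unfold Pre_build_requirements_met; infer_instance

def pvWitness_build_requirements_met : (List (String × Int)) × List String × (List (String × Int)) :=
  ([("marine", 1)], ["marine", "zealot"], [("marine", 2), ("scv", 0)])

def Spec_build_requirements_met (start : List (String × Int)) (build_order : List String) (required_units : List (String × Int)) (out : Bool) : Prop := out = build_requirements_met_alt start build_order required_units
instance (start : List (String × Int)) (build_order : List String) (required_units : List (String × Int)) (out : Bool) : Decidable (Spec_build_requirements_met start build_order required_units out) := by unfold Spec_build_requirements_met; infer_instance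

-- ===== CLAIM (what is proved, stated in full; the proofs are below) =====
def Claim_equal_build_requirements_met : Prop := ∀ (start : List (String × Int)) (build_order : List String) (required_units : List (String × Int)), Dom_build_requirements_met start build_order required_units → Pre_build_requirements_met start build_order required_units → Spec_build_requirements_met start build_order required_units (build_requirements_met start build_order required_units)

-- ===== LEMMAS AND PROOFS =====

-- A's loop is an `all` over required_units of "start value + count in build_order ≥ required".
lemma brmA_loop_eq_all (start : List (String × Int)) (bo : List String) (req : List (String × Int)) :
    brmA_loop start bo req
      = req.all (fun p => !decide ((PySem.Dict.mk start).getD p.1 0 + (bo.count p.1 : Int) < p.2)) := by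
  induction req with
  | nil => rfl
  | cons p rest ih =>
    obtain ⟨ru, ra⟩ := p
    have hcnt := PySem.List.foldl_count_if (fun u => u == ru) bo
    have hstart : (if (PySem.Dict.mk start).contains ru then (0 : Int) + (PySem.Dict.mk start).getD ru 0 else 0)
        = (PySem.Dict.mk start).getD ru 0 := by
      by_cases h : (PySem.Dict.mk start).contains ru = true
      · simp [h]
      · simp only [Bool.not_eq_true] at h
        simp [h, PySem.Dict.getD_of_not_contains _ _ h]
    simp only [brmA_loop, hstart, hcnt, List.all_cons, ih, List.count]
    by_cases hlt : (PySem.Dict.mk start).getD ru 0 + ((bo.countP (fun u => u == ru) : Int)) < ra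
    · simp [hlt]
    · simp [hlt]

-- the decrement pass preserves keys
lemma dec_fold_keys (bo : List String) (d : PySem.Dict String Int) :
    (bo.foldl (fun d unit => if d.contains unit then d.modify unit 0 (fun x => x - 1) else d) d).keys
      = d.keys := by
  induction bo generalizing d with
  | nil => rfl
  | cons u bo ih =>
    simp only [List.foldl_cons]
    by_cases h : d.contains u = true
    · rw [if_pos h, ih, PySem.Dict.keys_modify,
        PySem.Dict.keys_insert_of_contains _ _ h]
    · rw [if_neg (by simp [h])]
      exact ih d

-- after the decrement pass, each present key holds its old value minus its count in build_order
lemma dec_fold_getD (bo : List String) (d : PySem.Dict String Int) (v : String)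
    (hv : d.contains v = true) :
    (bo.foldl (fun d unit => if d.contains unit then d.modify unit 0 (fun x => x - 1) else d) d).getD v 0
      = d.getD v 0 - (bo.count v : Int) := by
  induction bo generalizing d with
  | nil => simp [List.count]
  | cons u bo ih =>
    simp only [List.foldl_cons]
    by_cases h : d.contains u = true
    · rw [if_pos h, ih _ (by simp [PySem.Dict.contains_modify, hv])]
      by_cases hvu : v = u
      · subst hvu
        rw [PySem.Dict.getD_modify_self]
        simp
        ring
      · rw [PySem.Dict.getD_modify_of_ne _ _ _ hvu]
        have hvu' : ¬ u = v := fun he => hvu he.symm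
        simp [hvu']
    · rw [if_neg (by simp [h]), ih _ hv]
      simp only [Bool.not_eq_true] at h
      have hvu : ¬ u = v := fun he => by rw [← he] at hv; rw [hv] at h; cases h
      simp [hvu]

-- two `all`s over the same list with pointwise-equal predicates coincide
lemma all_congr_mem {α : Type} (l : List α) (f g : α → Bool) (h : ∀ x ∈ l, f x = g x) :
    l.all f = l.all g := by
  induction l with
  | nil => rfl
  | cons x xs ih => simp_all [List.all_cons]

-- ===== VERDICT (by name: the statement is the Claim_ definition above) =====
theorem build_requirements_met_spec : Claim_equal_build_requirements_met := by
  intro start bo req _hDom hPre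
  unfold Spec_build_requirements_met build_requirements_met build_requirements_met_alt
  dsimp only
  rw [brmA_loop_eq_all]
  set f : (String × Int) → Int :=
    fun p => (PySem.Dict.mk req).getD p.1 0 - (PySem.Dict.mk start).getD p.1 0 with hf
  have hitems : (req.foldl (fun d p => d.insert p.1 (f p)) PySem.Dict.empty).items
      = req.map (fun p => (p.1, f p)) := by
    have := PySem.Dict.items_foldl_insert_fresh req Prod.fst f PySem.Dict.empty
      (fun a _ => by simp [PySem.Dict.contains_empty]) hPre
    simpa using this
  set needed0 := req.foldl (fun d p => d.insert p.1 (f p)) PySem.Dict.empty with hneeded0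
  have hkeys0 : needed0.keys = req.map Prod.fst := by
    show needed0.items.map Prod.fst = _
    rw [hitems]; simp
  have hnd0 : needed0.keys.Nodup := by rw [hkeys0]; exact hPre
  set d2 := bo.foldl (fun d unit => if d.contains unit then d.modify unit 0 (fun x => x - 1) else d) needed0 with hd2
  have hkeys2 : d2.keys = req.map Prod.fst := by rw [hd2, dec_fold_keys, hkeys0]
  have hnd2 : d2.keys.Nodup := by rw [hkeys2]; exact hPre
  rw [PySem.Dict.values_eq_map_keys d2 hnd2 0, hkeys2, List.all_map, List.all_map]
  apply all_congr_mem
  intro p hp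
  have hcont0 : needed0.contains p.1 = true := by
    rw [PySem.Dict.contains_eq_decide_mem_keys, hkeys0]
    simp only [decide_eq_true_eq]
    exact List.mem_map.2 ⟨p, hp, rfl⟩
  have hg2 : d2.getD p.1 0 = needed0.getD p.1 0 - (bo.count p.1 : Int) := by
    rw [hd2]; exact dec_fold_getD bo needed0 p.1 hcont0
  have hg0 : needed0.getD p.1 0 = f p := by
    refine PySem.Dict.getD_of_mem_items needed0 ?_ hnd0 0
    rw [hitems]; exact List.mem_map.2 ⟨p, hp, rfl⟩
  have hreq : (PySem.Dict.mk req).getD p.1 0 = p.2 := by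
    refine PySem.Dict.getD_of_mem_items _ ?_ ?_ 0
    · exact hp
    · rw [PySem.Dict.keys_mk]; exact hPre
  simp only [Function.comp, hg2, hg0, hf, hreq]
  by_cases h : (PySem.Dict.mk start).getD p.1 0 + (bo.count p.1 : Int) < p.2
  · simp [h]; omega
  · simp [h]; omega
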